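-- pv_equiv track=rewrite | github.com/jamessl154/advent-of-code-2021 | day24/brute_force.py | contains_zero_digit
-- ===== SOURCE A (Python) =====
-- def contains_zero_digit(integer): # https://stackoverflow.com/a/3847776
--   divisor = 10
--   remainder = 0
--
--   while divisor <= integer:
--     new_remainder = integer % divisor
--
--     if new_remainder - remainder == 0:
--       return True
--
--     divisor *= 10
--     remainder = new_remainder
--   return False
-- ===== SOURCE B (Python) =====
-- def contains_zero_digit(integer):
--     # A treats only integers >= 10 (its loop guard); everything <= 9 and all
--     # nonpositive numbers yield False. Scan the decimal string instead.
--     if integer <= 0: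
--         return False
--     return '0' in str(integer)
-- ===== Notes on version B (the rewrite author's own statement) =====
-- stated objective: idiomatic
-- what changed: Replaces the growing-powers-of-ten pairwise-remainder loop with a direct scan of the decimal string ('0' in str(integer)), guarded by the nonpositive case where A's loop never runs.
import Mathlib
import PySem

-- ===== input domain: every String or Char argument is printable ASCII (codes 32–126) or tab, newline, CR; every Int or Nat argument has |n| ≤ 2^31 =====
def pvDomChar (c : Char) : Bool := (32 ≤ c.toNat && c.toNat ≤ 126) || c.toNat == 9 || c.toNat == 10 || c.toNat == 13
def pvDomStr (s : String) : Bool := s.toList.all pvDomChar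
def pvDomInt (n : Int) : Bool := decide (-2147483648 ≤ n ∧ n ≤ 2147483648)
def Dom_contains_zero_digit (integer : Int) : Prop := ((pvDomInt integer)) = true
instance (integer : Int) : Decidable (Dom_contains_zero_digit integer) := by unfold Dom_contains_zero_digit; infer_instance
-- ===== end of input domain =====

-- B replaces A's growing-powers-of-ten pairwise-remainder loop by a direct scan of the
-- decimal string ('0' in str(integer)), guarded by the nonpositive case where A's loop never runs (idiomatic, not faster).


-- ===== PORT A =====
-- the while loop, fuel only makes it total: with the fuel supplied the 0-fuel branch is never reached
def czLoop : Nat → Int → Int → Int → Bool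
  | 0, _, _, _ => false
  | fuel + 1, integer, divisor, remainder =>
    if divisor ≤ integer then
      let new_remainder := PySem.Int.mod integer divisor
      if new_remainder - remainder = 0 then true
      else czLoop fuel integer (divisor * 10) new_remainder
    else false

def contains_zero_digit (integer : Int) : Bool :=
  czLoop (integer.toNat + 1) integer 10 0

-- ===== PORT B =====
def contains_zero_digit_alt (integer : Int) : Bool :=
  if integer ≤ 0 then false
  else PySem.Str.isIn "0" (PySem.Int.toStr integer)

-- ===== PRECONDITION & SPEC =====
def Spec_contains_zero_digit (integer : Int) (out : Bool) : Prop := out = contains_zero_digit_alt integer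
instance (integer : Int) (out : Bool) : Decidable (Spec_contains_zero_digit integer out) := by unfold Spec_contains_zero_digit; infer_instance

-- ===== CLAIM (what is proved, stated in full; the proofs are below) =====
def Claim_equal_contains_zero_digit : Prop := ∀ (integer : Int), Dom_contains_zero_digit integer → Spec_contains_zero_digit integer (contains_zero_digit integer)

-- ===== LEMMAS AND PROOFS =====

-- common reference: "some non-leading decimal digit of n is zero", scanning from the low end
def hasZero (n : Nat) : Bool :=
  if n < 10 then false
  else if n % 10 = 0 then true
  else hasZero (n / 10)
decreasing_by exact Nat.div_lt_self (by omega) (by omega)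

-- structural digit list of n (most significant first), matching Nat.toDigits
def mdigits (n : Nat) : List Char :=
  if n < 10 then [(n % 10).digitChar]
  else mdigits (n / 10) ++ [(n % 10).digitChar]
decreasing_by exact Nat.div_lt_self (by omega) (by omega)

theorem toDigitsCore_eq (fuel : Nat) : ∀ (n : Nat) (ds : List Char), n < fuel →
    Nat.toDigitsCore 10 fuel n ds = mdigits n ++ ds := by
  induction fuel with
  | zero => intro n ds h; omega
  | succ f ih =>
    intro n ds h
    rw [Nat.toDigitsCore]
    by_cases h10 : n < 10
    · have : n / 10 = 0 := Nat.div_eq_of_lt h10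
      simp [this, mdigits, h10]
    · have hne : ¬ n / 10 = 0 := by omega
      simp only [hne]
      rw [ih (n / 10) _ (by omega)]
      conv_rhs => rw [mdigits]
      rw [if_neg h10]
      simp

theorem toDigits_eq (n : Nat) : Nat.toDigits 10 n = mdigits n := by
  have := toDigitsCore_eq (n + 1) n [] (by omega)
  simpa [Nat.toDigits] using this

theorem digitChar_eq_zero_iff (d : Nat) (h : d < 10) : (Nat.digitChar d = '0') ↔ d = 0 := by
  interval_cases d <;> decide

theorem mem_mdigits_iff (n : Nat) (hn : 0 < n) : ('0' ∈ mdigits n) ↔ hasZero n = true := by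
  induction n using Nat.strong_induction_on with
  | _ n ih =>
    rw [mdigits, hasZero]
    by_cases h10 : n < 10
    · simp only [h10, if_pos, List.mem_singleton]
      rw [eq_comm, digitChar_eq_zero_iff _ (Nat.mod_lt _ (by omega))]
      simp
      omega
    · simp only [h10, if_neg, List.mem_append, List.mem_singleton, not_false_iff]
      rw [eq_comm (a := '0'), digitChar_eq_zero_iff _ (Nat.mod_lt _ (by omega))]
      rw [ih (n / 10) (Nat.div_lt_self (by omega) (by omega)) (by omega)]
      by_cases hm : n % 10 = 0 <;> simp [hm]

theorem singleton_infix_iff {c : Char} {l : List Char} : [c] <:+: l ↔ c ∈ l := by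
  constructor
  · rintro ⟨s, t, rfl⟩; simp
  · intro h
    obtain ⟨s, t, rfl⟩ := List.append_of_mem h
    exact ⟨s, t, by simp⟩

-- B's value on positive n is hasZero
theorem alt_pos (n : Int) (hn : 0 < n) :
    contains_zero_digit_alt n = hasZero n.toNat := by
  unfold contains_zero_digit_alt
  rw [if_neg (by omega)]
  have hinfix := PySem.Str.isIn_iff_infix "0" (PySem.Int.toStr n)
  have htl : (PySem.Int.toStr n).toList = Nat.toDigits 10 n.toNat := by
    rw [PySem.Int.toList_toStr]
    unfold PySem.Int.toChars
    rw [if_neg (by omega)]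
  rw [htl, toDigits_eq] at hinfix
  have h0 : ("0" : String).toList = ['0'] := rfl
  rw [h0, singleton_infix_iff, mem_mdigits_iff _ (by omega)] at hinfix
  by_cases hz : hasZero n.toNat = true
  · simp [hz] at hinfix ⊢; exact hinfix
  · simp only [Bool.not_eq_true] at hz
    rw [hz]
    rw [← Bool.not_eq_true]
    rw [hinfix, hz]
    simp

-- mod on a positive pair is Nat mod
theorem pymod_cast (a b : Nat) (hb : 0 < b) :
    PySem.Int.mod (a : Int) (b : Int) = ((a % b : Nat) : Int) := by
  unfold PySem.Int.mod
  rw [Int.fmod_eq_emod, if_pos (Or.inl (by positivity)), add_zero]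
  push_cast
  ring

-- A's loop at step k (divisor = 10^(k+1), remainder = n % 10^k) computes hasZero (n / 10^k)
theorem czLoop_eq (fuel : Nat) : ∀ (n : Nat) (k : Nat), 0 < n → n < 10 ^ (fuel + k) →
    czLoop fuel (n : Int) ((10 ^ (k + 1) : Nat) : Int) ((n % 10 ^ k : Nat) : Int)
      = hasZero (n / 10 ^ k) := by
  induction fuel with
  | zero =>
    intro n k hn hlt
    have : n / 10 ^ k = 0 := Nat.div_eq_of_lt (by simpa using hlt)
    rw [czLoop, this, hasZero]
    simp
  | succ f ih =>
    intro n k hn hlt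
    rw [czLoop]
    simp only
    by_cases hle : ((10 ^ (k + 1) : Nat) : Int) ≤ (n : Int)
    · rw [if_pos hle]
      have hleN : 10 ^ (k + 1) ≤ n := by exact_mod_cast hle
      have hge10 : ¬ n / 10 ^ k < 10 := by
        have h1 : 10 * 10 ^ k ≤ n := by rw [pow_succ] at hleN; omega
        have := (Nat.le_div_iff_mul_le (show 0 < 10 ^ k by positivity)).mpr h1
        omega
      rw [pymod_cast n _ (by positivity)]
      by_cases heq : n % 10 ^ (k + 1) = n % 10 ^ k
      · rw [if_pos (by rw [heq]; ring)]
        have : (n / 10 ^ k) % 10 = 0 := by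
          have := Nat.mod_mod_of_dvd n (pow_dvd_pow 10 (Nat.le_succ k))
          have h2 : n % 10 ^ (k+1) / 10 ^ k = (n / 10 ^ k) % 10 := by
            rw [pow_succ, Nat.mod_mul_right_div_self]
          rw [heq] at h2
          rw [← h2, Nat.div_eq_of_lt (Nat.mod_lt _ (by positivity))]
        rw [hasZero, if_neg hge10, if_pos this]
      · rw [if_neg (by intro h; exact heq (by exact_mod_cast sub_eq_zero.mp h))]
        have hmne : ¬ (n / 10 ^ k) % 10 = 0 := by
          intro h
          apply heq
          have h2 : n % 10 ^ (k+1) / 10 ^ k = (n / 10 ^ k) % 10 := by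
            rw [pow_succ, Nat.mod_mul_right_div_self]
          have h3 : n % 10 ^ (k+1) % 10 ^ k = n % 10 ^ k :=
            Nat.mod_mod_of_dvd n (pow_dvd_pow 10 (Nat.le_succ k))
          have h4 := Nat.div_add_mod (n % 10 ^ (k+1)) (10 ^ k)
          rw [h2, h, Nat.mul_zero, Nat.zero_add] at h4
          rw [← h4, h3]
        have hmul : ((10 ^ (k + 1) : Nat) : Int) * 10 = ((10 ^ (k + 1 + 1) : Nat) : Int) := by
          push_cast; ring
        rw [hmul]
        have hrec := ih n (k + 1) hn (by rw [show f + (k + 1) = f + 1 + k from by omega]; exact hlt)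
        rw [hrec]
        conv_rhs => rw [hasZero]
        rw [if_neg hge10, if_neg hmne, Nat.div_div_eq_div_mul, ← pow_succ]
    · rw [if_neg hle]
      have hltk : n < 10 ^ (k + 1) := by
        have : (n : Int) < ((10 ^ (k + 1) : Nat) : Int) := lt_of_not_ge hle
        exact_mod_cast this
      have : n / 10 ^ k < 10 := by
        rw [Nat.div_lt_iff_lt_mul (by positivity)]
        rw [pow_succ] at hltk
        omega
      rw [hasZero, if_pos this]

theorem pow_gt_self (m : Nat) : m < 10 ^ (m + 1) := by
  have h : m + 1 < 10 ^ (m + 1) := Nat.lt_pow_self (by omega)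
  omega

-- ===== VERDICT (by name: the statement is the Claim_ definition above) =====
theorem contains_zero_digit_spec : Claim_equal_contains_zero_digit := by
  intro n _
  unfold Spec_contains_zero_digit contains_zero_digit
  by_cases hn : n ≤ 0
  · have h1 : ¬ (10 : Int) ≤ n := by omega
    rw [czLoop, if_neg h1]
    unfold contains_zero_digit_alt
    rw [if_pos hn]
  · have hn' : 0 < n := by omega
    have hcast : ((n.toNat : Nat) : Int) = n := Int.toNat_of_nonneg (by omega)
    have h := czLoop_eq (n.toNat + 1) n.toNat 0 (by omega) (by simpa using pow_gt_self n.toNat)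
    rw [hcast] at h
    norm_num at h
    rw [h, alt_pos n hn']
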